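-- pv_equiv track=rewrite | github.com/nicholaspuchaf/unicamp-mc102 | lab06.py | soma_vetores
-- ===== SOURCE A (Python) =====
-- def soma_vetores(v1: list[int], v2: list[int]) -> list[int]:
--
--     tam = len(v1) if len(v1) > len(v2) else len(v2)
--
--     resultado = []
--
--     for i in range(tam):
--
--         if len(v1) < i+1:
--             v1.append(0)
--         if len(v2) < i+1:
--             v2.append(0)
--
--         resultado.append(v1[i]+v2[i])
--
--     return resultado
-- ===== SOURCE B (Python) =====
-- def soma_vetores(v1: list[int], v2: list[int]) -> list[int]:
--     # No padding at all: sum the overlapping prefix, then append the unmatched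
--     # tail of the longer list verbatim (adding 0 is adding nothing).
--     # NOTE: unlike A, this does not mutate v1/v2 in place; return value is identical.
--     n = min(len(v1), len(v2))
--     return [v1[i] + v2[i] for i in range(n)] + v1[n:] + v2[n:]
-- ===== Notes on version B (the rewrite author's own statement) =====
-- stated objective: simpler
-- what changed: B drops A's zero-padding machinery entirely: it sums only the overlapping prefix and concatenates the longer list's unmatched tail verbatim, replacing A's per-index length checks and in-place appends (return-value equivalence only; B does not mutate its arguments).
import Mathlib
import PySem

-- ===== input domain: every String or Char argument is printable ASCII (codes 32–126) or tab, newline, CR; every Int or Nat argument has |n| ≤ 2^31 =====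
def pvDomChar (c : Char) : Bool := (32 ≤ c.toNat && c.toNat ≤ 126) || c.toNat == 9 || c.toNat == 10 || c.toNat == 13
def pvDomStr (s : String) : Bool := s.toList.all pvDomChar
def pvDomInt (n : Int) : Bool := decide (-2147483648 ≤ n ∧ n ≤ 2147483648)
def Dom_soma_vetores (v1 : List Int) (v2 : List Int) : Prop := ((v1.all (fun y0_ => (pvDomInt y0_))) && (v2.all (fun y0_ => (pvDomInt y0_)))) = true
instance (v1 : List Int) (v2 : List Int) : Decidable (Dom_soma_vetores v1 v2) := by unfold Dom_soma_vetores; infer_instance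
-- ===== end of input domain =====

-- B avoids A's zero-padding altogether: it sums the overlapping prefix and appends the longer
-- list's unmatched tail verbatim (simpler, same cost). A mutates v1/v2 in place (pads with
-- zeros); B does not — the equivalence is about the RETURN value only.

-- ===== PORT A =====
-- one iteration of A's for-loop: state = (v1, v2, resultado); v1[i]/v2[i] are in range
-- after the padding branches (proved below), so the .getD 0 default is never used
def somaStepA (s : List Int × List Int × List Int) (i : Nat) : List Int × List Int × List Int :=
  let a := if s.1.length < i + 1 then s.1 ++ [0] else s.1
  let b := if s.2.1.length < i + 1 then s.2.1 ++ [0] else s.2.1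
  (a, b, s.2.2 ++ [(PySem.List.pyGet? a (i : Int)).getD 0 + (PySem.List.pyGet? b (i : Int)).getD 0])

def soma_vetores (v1 : List Int) (v2 : List Int) : List Int :=
  let tam := if v1.length > v2.length then v1.length else v2.length
  ((List.range tam).foldl somaStepA (v1, v2, [])).2.2

-- ===== PORT B =====
-- n = min(len(v1), len(v2)); [v1[i]+v2[i] for i in range(n)] + v1[n:] + v2[n:]
def soma_vetores_alt (v1 : List Int) (v2 : List Int) : List Int :=
  let n := min v1.length v2.length
  ((List.range n).map (fun (i : Nat) =>
      (PySem.List.pyGet? v1 (i : Int)).getD 0 + (PySem.List.pyGet? v2 (i : Int)).getD 0))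
    ++ PySem.List.slice v1 (some (n : Int)) none
    ++ PySem.List.slice v2 (some (n : Int)) none

-- ===== PRECONDITION & SPEC =====
def Spec_soma_vetores (v1 : List Int) (v2 : List Int) (out : List Int) : Prop := out = soma_vetores_alt v1 v2
instance (v1 : List Int) (v2 : List Int) (out : List Int) : Decidable (Spec_soma_vetores v1 v2 out) := by unfold Spec_soma_vetores; infer_instance

-- ===== CLAIM (what is proved, stated in full; the proofs are below) =====
def Claim_equal_soma_vetores : Prop := ∀ (v1 : List Int) (v2 : List Int), Dom_soma_vetores v1 v2 → Spec_soma_vetores v1 v2 (soma_vetores v1 v2)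

-- ===== LEMMAS AND PROOFS =====

-- appending zero padding never changes a default-0 lookup
theorem getD_append_replicate_zero (v : List Int) (k i : Nat) :
    (v ++ List.replicate k 0).getD i 0 = v.getD i 0 := by
  by_cases h : i < v.length
  · simp [List.getD_eq_getElem?_getD, List.getElem?_append_left h]
  · rw [List.getD_eq_getElem?_getD, List.getD_eq_getElem?_getD,
      List.getElem?_append_right (by omega), List.getElem?_eq_none (l := v) (by omega)]
    simp [List.getElem?_replicate]
    split <;> rfl

-- invariant of A's loop after t iterations
theorem somaA_invariant (v1 v2 : List Int) (t : Nat) :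
    (List.range t).foldl somaStepA (v1, v2, []) =
      (v1 ++ List.replicate (t - v1.length) 0,
       v2 ++ List.replicate (t - v2.length) 0,
       (List.range t).map (fun i => v1.getD i 0 + v2.getD i 0)) := by
  induction t with
  | zero => simp
  | succ t ih =>
    rw [List.range_succ, List.foldl_append, ih]
    have pad : ∀ (v : List Int),
        (if (v ++ List.replicate (t - v.length) 0).length < t + 1
         then (v ++ List.replicate (t - v.length) 0) ++ [0]
         else v ++ List.replicate (t - v.length) 0)
        = v ++ List.replicate (t + 1 - v.length) 0 := by
      intro v
      by_cases h : v.length ≤ t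
      · rw [if_pos (by simp; omega)]
        have : t + 1 - v.length = (t - v.length) + 1 := by omega
        simp [this, List.replicate_succ']
      · rw [if_neg (by simp; omega)]
        have h1 : t - v.length = 0 := by omega
        have h2 : t + 1 - v.length = 0 := by omega
        simp [h1, h2]
    have get : ∀ (v : List Int),
        ((PySem.List.pyGet? (v ++ List.replicate (t + 1 - v.length) 0) (t : Int)).getD 0)
          = v.getD t 0 := by
      intro v
      rw [PySem.List.pyGet?_natCast]
      have : ((v ++ List.replicate (t + 1 - v.length) 0)[t]?).getD 0
          = (v ++ List.replicate (t + 1 - v.length) 0).getD t 0 := by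
        simp [List.getD]
      rw [this, getD_append_replicate_zero]
    simp only [List.foldl_cons, List.foldl_nil, somaStepA]
    rw [pad v1, pad v2, get v1, get v2]
    simp

-- B equals the same index-wise formula over range(max)
theorem alt_eq_map (v1 v2 : List Int) :
    soma_vetores_alt v1 v2 =
      (List.range (max v1.length v2.length)).map (fun i => v1.getD i 0 + v2.getD i 0) := by
  unfold soma_vetores_alt
  simp only [PySem.List.slice_from_natCast]
  set n := min v1.length v2.length with hn
  set m := max v1.length v2.length with hm
  have hgets : ∀ i, i < n →
      (PySem.List.pyGet? v1 (i : Int)).getD 0 + (PySem.List.pyGet? v2 (i : Int)).getD 0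
        = v1.getD i 0 + v2.getD i 0 := by
    intro i _
    rw [PySem.List.pyGet?_natCast, PySem.List.pyGet?_natCast]
    simp [List.getD]
  apply List.ext_getElem
  · simp [hn, hm]; omega
  · intro i h1 h2
    have hlen : ((List.range n).map (fun (i : Nat) =>
        (PySem.List.pyGet? v1 (i : Int)).getD 0 + (PySem.List.pyGet? v2 (i : Int)).getD 0)).length = n := by
      simp
    have him : i < m := by simpa using h2
    by_cases hi : i < n
    · rw [List.getElem_append_left (by rw [List.length_append, hlen]; omega),
        List.getElem_append_left (by rw [hlen]; omega)]
      simp only [List.getElem_map, List.getElem_range]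
      rw [hgets _ (by simpa using hi)]
    · -- tail region: exactly one of the two dropped tails is nonempty
      rw [List.getElem_map, List.getElem_range]
      have hni : n + (i - n) = i := by omega
      by_cases hc : v1.length ≤ v2.length
      · have hd1 : v1.drop n = [] := by simp; omega
        have hiv2 : i < v2.length := by omega
        simp only [hd1, List.append_nil]
        rw [List.getElem_append_right (by simp; omega), List.getElem_drop]
        have hz : v1.getD i 0 = 0 := by
          rw [List.getD_eq_getElem?_getD, List.getElem?_eq_none (by omega)]; rfl
        have hv2 : v2.getD i 0 = v2[i]'hiv2 := by
          rw [List.getD_eq_getElem?_getD, List.getElem?_eq_getElem hiv2]; rfl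
        rw [hz, hv2, zero_add]
        simp only [hlen, hni]
      · have hd2 : v2.drop n = [] := by simp; omega
        have hiv1 : i < v1.length := by omega
        simp only [hd2, List.append_nil]
        rw [List.getElem_append_right (by simp; omega), List.getElem_drop]
        have hz : v2.getD i 0 = 0 := by
          rw [List.getD_eq_getElem?_getD, List.getElem?_eq_none (by omega)]; rfl
        have hv1 : v1.getD i 0 = v1[i]'hiv1 := by
          rw [List.getD_eq_getElem?_getD, List.getElem?_eq_getElem hiv1]; rfl
        rw [hz, hv1, add_zero]
        simp only [hlen, hni]

-- ===== VERDICT (by name: the statement is the Claim_ definition above) =====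
theorem soma_vetores_spec : Claim_equal_soma_vetores := by
  intro v1 v2 _
  unfold Spec_soma_vetores
  rw [alt_eq_map]
  have htam : (if v1.length > v2.length then v1.length else v2.length) = max v1.length v2.length := by
    split <;> omega
  simp only [soma_vetores, htam, somaA_invariant]
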